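-- pv_equiv track=rewrite | github.com/mounicabhogadi/DataStructures | Python/Sets/Brackets.py | make_angle_brackets_match
-- ===== SOURCE A (Python) =====
-- def make_angle_brackets_match(angles):
--     left_count = 0
--     result = ""
--
--     # Add leading angle brackets
--     for char in angles:
--         if char == '>':
--             if left_count > 0:
--                 left_count -= 1
--             else:
--                 result = '<' + result
--         else:
--             left_count += 1
--         result += char
--
--     # Add trailing angle brackets
--     result += '>' * left_count
--
--     return result
-- ===== SOURCE B (Python) =====
-- def make_angle_brackets_match(angles):
--     balance = 0
--     min_balance = 0
--     for char in angles:
--         if char == '>':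
--             balance -= 1
--         else:
--             balance += 1
--         if balance < min_balance:
--             min_balance = balance
--     return '<' * (-min_balance) + angles + '>' * (balance - min_balance)
-- ===== Notes on version B (the rewrite author's own statement) =====
-- stated objective: simpler
-- what changed: B replaces A's greedy per-character rebuilding of the result string with a running-balance/minimum-prefix-balance scan over two ints, then forms the output in one concatenation of '<'*(-min), the original string and '>'*(balance-min).
import Mathlib
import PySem

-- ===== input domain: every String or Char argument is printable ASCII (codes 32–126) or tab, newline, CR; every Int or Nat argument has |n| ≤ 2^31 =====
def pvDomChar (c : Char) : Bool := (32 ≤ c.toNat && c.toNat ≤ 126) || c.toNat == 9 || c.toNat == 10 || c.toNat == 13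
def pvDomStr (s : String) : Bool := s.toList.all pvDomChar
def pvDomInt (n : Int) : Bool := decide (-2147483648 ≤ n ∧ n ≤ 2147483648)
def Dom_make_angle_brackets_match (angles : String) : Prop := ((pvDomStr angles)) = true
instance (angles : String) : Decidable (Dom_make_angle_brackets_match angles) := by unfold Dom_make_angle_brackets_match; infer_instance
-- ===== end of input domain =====

-- B balances the string via a running balance and its minimum prefix value instead of A's
-- greedy per-character string rebuilding; objective: simpler (the return value is identical).

-- ===== PORT A =====
-- A's loop: state (left_count, result); '<' + result becomes a cons, result += char an append.
def pvALoop : List Char → Int → List Char → Int × List Char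
  | [], lc, r => (lc, r)
  | c :: cs, lc, r =>
    if c = '>' then
      if lc > 0 then pvALoop cs (lc - 1) (r ++ [c])
      else pvALoop cs lc (('<' :: r) ++ [c])
    else pvALoop cs (lc + 1) (r ++ [c])

def make_angle_brackets_match (angles : String) : String :=
  let p := pvALoop angles.toList 0 []
  String.ofList (p.2 ++ List.replicate p.1.toNat '>')

-- ===== PORT B =====
-- B's loop: state (balance, min_balance).
def pvBLoop : List Char → Int → Int → Int × Int
  | [], b, m => (b, m)
  | c :: cs, b, m =>
    let b' := if c = '>' then b - 1 else b + 1
    pvBLoop cs b' (if b' < m then b' else m)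

def make_angle_brackets_match_alt (angles : String) : String :=
  let p := pvBLoop angles.toList 0 0
  String.ofList (List.replicate (-p.2).toNat '<' ++ angles.toList ++ List.replicate (p.1 - p.2).toNat '>')

-- ===== PRECONDITION & SPEC =====
def Spec_make_angle_brackets_match (angles : String) (out : String) : Prop := out = make_angle_brackets_match_alt angles
instance (angles : String) (out : String) : Decidable (Spec_make_angle_brackets_match angles out) := by unfold Spec_make_angle_brackets_match; infer_instance

-- ===== CLAIM (what is proved, stated in full; the proofs are below) =====
def Claim_equal_make_angle_brackets_match : Prop := ∀ (angles : String), Dom_make_angle_brackets_match angles → Spec_make_angle_brackets_match angles (make_angle_brackets_match angles)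

-- ===== LEMMAS AND PROOFS =====
-- B's min_balance never increases.
lemma pvBLoop_min_le : ∀ (cs : List Char) (b m : Int), (pvBLoop cs b m).2 ≤ m := by
  intro cs
  induction cs with
  | nil => intro b m; simp [pvBLoop]
  | cons c cs ih =>
    intro b m
    simp only [pvBLoop]
    refine le_trans (ih _ _) ?_
    split <;> omega

-- Invariant tying A's loop to B's: starting A with left_count = b - m and accumulated result r
-- yields left_count b' - m' and result replicate (m - m') '<' ++ r ++ cs.
lemma pvLoop_key : ∀ (cs : List Char) (b m : Int) (r : List Char), m ≤ 0 → m ≤ b →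
    pvALoop cs (b - m) r =
      ((pvBLoop cs b m).1 - (pvBLoop cs b m).2,
       List.replicate (m - (pvBLoop cs b m).2).toNat '<' ++ r ++ cs) := by
  intro cs
  induction cs with
  | nil => intro b m r _ _; simp [pvALoop, pvBLoop]
  | cons c cs ih =>
    intro b m r hm0 hmb
    by_cases hc : c = '>'
    · subst hc
      have hA : pvALoop ('>' :: cs) (b - m) r =
          if b - m > 0 then pvALoop cs (b - m - 1) (r ++ ['>'])
          else pvALoop cs (b - m) (('<' :: r) ++ ['>']) := rfl
      have hB : pvBLoop ('>' :: cs) b m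
          = pvBLoop cs (b - 1) (if b - 1 < m then b - 1 else m) := rfl
      by_cases hpos : b - m > 0
      · -- left_count > 0: min unchanged
        rw [hA, if_pos hpos, hB, if_neg (show ¬ b - 1 < m by omega),
          show b - m - 1 = b - 1 - m by ring, ih (b - 1) m (r ++ ['>']) hm0 (by omega)]
        simp
      · -- left_count = 0: A prepends '<', B's min drops to b - 1
        have hbm : b = m := by omega
        subst hbm
        rw [hA, if_neg hpos, hB, if_pos (show b - 1 < b by omega),
          show b - b = b - 1 - (b - 1) by ring,
          ih (b - 1) (b - 1) (('<' :: r) ++ ['>']) (by omega) (by omega)]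
        have hle := pvBLoop_min_le cs (b - 1) (b - 1)
        refine Prod.ext (by simp) ?_
        have hcnt : (b - (pvBLoop cs (b - 1) (b - 1)).2).toNat
            = (b - 1 - (pvBLoop cs (b - 1) (b - 1)).2).toNat + 1 := by omega
        simp only [hcnt, List.replicate_succ']
        simp
    · have hA : pvALoop (c :: cs) (b - m) r = pvALoop cs (b - m + 1) (r ++ [c]) := by
        simp only [pvALoop, if_neg hc]
      have hB : pvBLoop (c :: cs) b m = pvBLoop cs (b + 1) m := by
        simp only [pvBLoop, if_neg hc]
        rw [if_neg (show ¬ b + 1 < m by omega)]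
      rw [hA, hB, show b - m + 1 = b + 1 - m by ring, ih (b + 1) m (r ++ [c]) hm0 (by omega)]
      simp

-- ===== VERDICT (by name: the statement is the Claim_ definition above) =====
theorem make_angle_brackets_match_spec : Claim_equal_make_angle_brackets_match := by
  intro angles _
  unfold Spec_make_angle_brackets_match make_angle_brackets_match make_angle_brackets_match_alt
  have h := pvLoop_key angles.toList 0 0 [] le_rfl le_rfl
  simp only [show (0 : Int) - 0 = 0 from rfl] at h
  rw [h]
  simp
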